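-- pv_equiv track=rewrite | github.com/AallynReed/RenewedTroveTools | utils/trove/mastery.py | mr_to_points
-- ===== SOURCE A (Python) =====
-- from math import ceil
--
-- def mr_to_points(level):
--     points = 0
--     i = 1
--     while True:
--         i += 1
--         if i <= 5:
--             increment = 25
--         elif 6 <= i <= 10:
--             increment = 50
--         elif 11 <= i <= 20:
--             increment = 75
--         elif 21 <= i <= 300:
--             increment = 100
--         elif i > 300:
--             increment = 150 + ceil((i - 300) * 0.5)
--         if i == level + 1:
--             if i - 1 > 300:
--                 increment = 150 + ceil((i - 1 - 300) * 0.5)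
--             break
--         points += increment
--     return increment, points
-- ===== SOURCE B (Python) =====
-- def mr_to_points(level):
--     # Closed-form: O(1) arithmetic instead of iterating every level.
--     def inc(i):
--         if i <= 5:
--             return 25
--         if i <= 10:
--             return 50
--         if i <= 20:
--             return 75
--         if i <= 300:
--             return 100
--         return 150 + (i - 299) // 2  # 150 + ceil((i - 300) / 2)
--
--     p = 25 * (min(level, 5) - 1)
--     if level > 5:
--         p += 50 * (min(level, 10) - 5)
--     if level > 10:
--         p += 75 * (min(level, 20) - 10)
--     if level > 20:
--         p += 100 * (min(level, 300) - 20)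
--     if level > 300:
--         m = level - 300
--         p += 150 * m + (m + 1) // 2 * (m // 2 + 1)  # sum of ceil(k/2), k=1..m
--     increment = inc(level + 1) if level <= 300 else inc(level)
--     return increment, p
-- ===== Notes on version B (the rewrite author's own statement) =====
-- stated objective: faster
-- what changed: Replaced the per-level accumulation loop with closed-form arithmetic-series sums per tier (ceil terms summed via (m+1)//2*(m//2+1)), computing both the increment and the total in O(1).
-- outside the precondition, e.g. on mr_to_points(0): A does not finish within the time limit, B returns (25, -25)
import Mathlib
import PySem

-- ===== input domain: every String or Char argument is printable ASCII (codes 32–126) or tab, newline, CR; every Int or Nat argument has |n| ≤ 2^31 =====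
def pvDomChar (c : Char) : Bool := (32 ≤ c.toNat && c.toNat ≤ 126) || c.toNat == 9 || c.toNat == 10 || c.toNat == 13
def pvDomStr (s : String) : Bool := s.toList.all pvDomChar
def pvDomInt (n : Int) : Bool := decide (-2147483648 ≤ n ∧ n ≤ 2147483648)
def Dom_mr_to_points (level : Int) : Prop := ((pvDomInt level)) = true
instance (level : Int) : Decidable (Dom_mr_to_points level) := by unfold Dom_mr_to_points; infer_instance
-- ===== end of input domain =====

-- B replaces A's per-level loop with O(1) closed-form tier sums; equivalence of the return value on level ≥ 1 (A loops forever otherwise).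

-- ===== PORT A =====
-- the per-iteration increment (the if/elif chain of the loop body, for the already-incremented i)
-- ceil((i-300)*0.5) is ported as (i-300+1)//2: exact, since k*0.5 is an exact float operation for these k
def incA (i : Int) : Int :=
  if i ≤ 5 then 25
  else if 6 ≤ i ∧ i ≤ 10 then 50
  else if 11 ≤ i ∧ i ≤ 20 then 75
  else if 21 ≤ i ∧ i ≤ 300 then 100
  else if i > 300 then 150 + PySem.Int.floordiv (i - 300 + 1) 2
  else 0  -- unreachable: the branches above cover every integer

-- the 'while True' loop; fuel counts the remaining iterations (enough fuel is supplied under Pre_,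
-- since the loop breaks at i = level + 1); the fuel-0 value is never reached on Pre_
def loopA (fuel : Nat) (i points level : Int) : Int × Int :=
  match fuel with
  | 0 => (0, 0)
  | f + 1 =>
    let i' := i + 1
    let increment := incA i'
    if i' = level + 1 then
      (if i' - 1 > 300 then 150 + PySem.Int.floordiv (i' - 1 - 300 + 1) 2 else increment, points)
    else loopA f i' (points + increment) level

def mr_to_points (level : Int) : Int × Int := loopA level.toNat 1 0 level

-- ===== PORT B =====
def incB (i : Int) : Int :=
  if i ≤ 5 then 25
  else if i ≤ 10 then 50
  else if i ≤ 20 then 75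
  else if i ≤ 300 then 100
  else 150 + PySem.Int.floordiv (i - 299) 2

def mr_to_points_alt (level : Int) : Int × Int :=
  let p0 := 25 * (min level 5 - 1)
  let p1 := if level > 5 then p0 + 50 * (min level 10 - 5) else p0
  let p2 := if level > 10 then p1 + 75 * (min level 20 - 10) else p1
  let p3 := if level > 20 then p2 + 100 * (min level 300 - 20) else p2
  let p4 := if level > 300 then
      let m := level - 300
      p3 + 150 * m + PySem.Int.floordiv (m + 1) 2 * (PySem.Int.floordiv m 2 + 1)
    else p3
  let increment := if level ≤ 300 then incB (level + 1) else incB level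
  (increment, p4)

-- ===== PRECONDITION & SPEC =====
-- Pre_ excludes level ≤ 0, on which A's while-loop never terminates (it diverges, returning nothing).
def Pre_mr_to_points (level : Int) : Prop := 1 ≤ level
instance (level : Int) : Decidable (Pre_mr_to_points level) := by unfold Pre_mr_to_points; infer_instance
def pvWitness_mr_to_points : Int := (5)

def Spec_mr_to_points (level : Int) (out : Int × Int) : Prop := out = mr_to_points_alt level
instance (level : Int) (out : Int × Int) : Decidable (Spec_mr_to_points level out) := by unfold Spec_mr_to_points; infer_instance

-- ===== CLAIM (what is proved, stated in full; the proofs are below) =====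
def Claim_equal_mr_to_points : Prop := ∀ (level : Int), Dom_mr_to_points level → Pre_mr_to_points level → Spec_mr_to_points level (mr_to_points level)

-- ===== LEMMAS AND PROOFS =====

-- sum of incA over i+1 .. i+n (head recursion, mirroring the loop)
def sumInc (i : Int) : Nat → Int
  | 0 => 0
  | n + 1 => incA (i + 1) + sumInc (i + 1) n

theorem sumInc_tail (n : Nat) : ∀ i : Int, sumInc i (n + 1) = sumInc i n + incA (i + n + 1) := by
  induction n with
  | zero => intro i; simp [sumInc]
  | succ m ih =>
    intro i
    rw [show sumInc i (m + 1 + 1) = incA (i + 1) + sumInc (i + 1) (m + 1) from rfl,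
        show sumInc i (m + 1) = incA (i + 1) + sumInc (i + 1) m from rfl,
        ih (i + 1),
        show (i + 1 + (m : Int) + 1) = i + (((m + 1 : Nat)) : Int) + 1 from by push_cast; ring]
    exact (add_assoc _ _ _).symm

theorem loopA_eq (fuel : Nat) :
    ∀ i points level : Int, i ≤ level → level - i < fuel →
      loopA fuel i points level =
        ((if level > 300 then 150 + PySem.Int.floordiv (level - 300 + 1) 2 else incA (level + 1)),
         points + sumInc i (level - i).toNat) := by
  induction fuel with
  | zero => intro i points level h1 h2; omega
  | succ f ih =>
    intro i points level h1 h2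
    by_cases hb : i + 1 = level + 1
    · have ht : (level - i).toNat = 0 := by omega
      simp only [loopA, ht, sumInc, add_zero]
      rw [if_pos hb, show i + 1 - 1 - 300 + 1 = level - 300 + 1 from by omega,
          show i + 1 - 1 = level from by omega, hb]
    · have hlt : i + 1 ≤ level := by omega
      have hstep : loopA (f + 1) i points level = loopA f (i + 1) (points + incA (i + 1)) level := by
        simp [loopA, hb]
      rw [hstep, ih (i + 1) (points + incA (i + 1)) level hlt (by omega)]
      have hn : (level - i).toNat = (level - (i + 1)).toNat + 1 := by omega
      rw [hn]
      show _ = (_, points + (incA (i + 1) + sumInc (i + 1) (level - (i + 1)).toNat))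
      rw [add_assoc]

-- floor division by 2 agrees with Lean's ediv (the divisor is positive)
theorem fd2 (m : Int) : PySem.Int.floordiv m 2 = m / 2 :=
  PySem.Int.floordiv_eq_ediv_of_pos (by omega)

-- B's closed-form total as a standalone definition (definitionally alt's second component)
def cumB (n : Int) : Int :=
  let p0 := 25 * (min n 5 - 1)
  let p1 := if n > 5 then p0 + 50 * (min n 10 - 5) else p0
  let p2 := if n > 10 then p1 + 75 * (min n 20 - 10) else p1
  let p3 := if n > 20 then p2 + 100 * (min n 300 - 20) else p2
  if n > 300 then
    let m := n - 300
    p3 + 150 * m + PySem.Int.floordiv (m + 1) 2 * (PySem.Int.floordiv m 2 + 1)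
  else p3

theorem incA_big (i : Int) (h : 300 < i) : incA i = 150 + (i - 299) / 2 := by
  unfold incA
  rw [if_neg (by omega), if_neg (by omega), if_neg (by omega), if_neg (by omega),
      if_pos (by omega : i > 300), fd2, show i - 300 + 1 = i - 299 from by ring]

theorem cumB_small (n : Int) (h1 : 1 ≤ n) (h2 : n ≤ 300) :
    cumB n = 25 * (min n 5 - 1)
      + (if n > 5 then 50 * (min n 10 - 5) else 0)
      + (if n > 10 then 75 * (min n 20 - 10) else 0)
      + (if n > 20 then 100 * (n - 20) else 0) := by
  simp only [cumB]
  rw [if_neg (by omega : ¬ n > 300)]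
  split_ifs <;> [skip; skip; skip; skip; skip; skip; skip; skip] <;> omega

theorem cumB_big (n : Int) (h : 300 < n) :
    cumB n = 29100 + 150 * (n - 300) + (n - 299) / 2 * ((n - 300) / 2 + 1) := by
  simp only [cumB, fd2]
  rw [if_pos (by omega : n > 300), if_pos (by omega : n > 20), if_pos (by omega : n > 10),
      if_pos (by omega : n > 5),
      min_eq_right (by omega : (5:Int) ≤ n), min_eq_right (by omega : (10:Int) ≤ n),
      min_eq_right (by omega : (20:Int) ≤ n), min_eq_right (by omega : (300:Int) ≤ n),
      show n - 300 + 1 = n - 299 from by ring]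
  ring

set_option maxHeartbeats 2000000 in
theorem cumB_step (m : Int) (hm : 1 ≤ m) : cumB (m + 1) = cumB m + incA (m + 1) := by
  by_cases h : m ≤ 299
  · rw [cumB_small (m+1) (by omega) (by omega), cumB_small m (by omega) (by omega)]
    unfold incA
    split_ifs <;> omega
  · by_cases h0 : m = 300
    · subst h0; decide
    · rw [cumB_big (m+1) (by omega), cumB_big m (by omega), incA_big (m+1) (by omega)]
      obtain ⟨k, hk⟩ : ∃ k, m = 301 + 2*k ∨ m = 302 + 2*k := ⟨(m - 301)/2, by omega⟩
      rcases hk with hk | hk <;> subst hk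
      · rw [show (301 + 2*k + 1 - 299 : Int) = 2*(k+1) + 1 from by ring,
            show (301 + 2*k + 1 - 300 : Int) = 2*(k+1) from by ring,
            show (301 + 2*k - 299 : Int) = 2*(k+1) from by ring,
            show (301 + 2*k - 300 : Int) = 2*k + 1 from by ring,
            Int.mul_ediv_cancel_left _ (by omega : (2:Int) ≠ 0),
            show ((2*(k+1)+1 : Int)) / 2 = k + 1 from by omega,
            show ((2*k+1 : Int)) / 2 = k from by omega]
        ring
      · rw [show (302 + 2*k + 1 - 299 : Int) = 2*(k+2) from by ring,
            show (302 + 2*k + 1 - 300 : Int) = 2*k + 3 from by ring,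
            show (302 + 2*k - 299 : Int) = 2*k + 3 from by ring,
            show (302 + 2*k - 300 : Int) = 2*(k+1) from by ring,
            Int.mul_ediv_cancel_left _ (by omega : (2:Int) ≠ 0),
            Int.mul_ediv_cancel_left _ (by omega : (2:Int) ≠ 0),
            show ((2*k+3 : Int)) / 2 = k + 1 from by omega]
        ring

theorem alt_snd (level : Int) : (mr_to_points_alt level).2 = cumB level := rfl

theorem alt_fst (level : Int) :
    (mr_to_points_alt level).1 = if level ≤ 300 then incB (level + 1) else incB level := rfl

theorem cumB_eq (n : Nat) : cumB ((n : Int) + 1) = sumInc 1 n := by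
  induction n with
  | zero => decide
  | succ k ih =>
    rw [sumInc_tail k 1, ← ih, show ((((k : Nat) + 1 : Nat)) : Int) + 1 = (((k : Int)) + 1) + 1 from by push_cast; ring]
    rw [cumB_step ((k : Int) + 1) (by omega)]
    congr 2
    ring

theorem incB_eq (level : Int) (h : 1 ≤ level) :
    (if level > 300 then 150 + PySem.Int.floordiv (level - 300 + 1) 2 else incA (level + 1))
      = (if level ≤ 300 then incB (level + 1) else incB level) := by
  unfold incA incB
  rw [show level - 300 + 1 = level - 299 from by ring,
      show level + 1 - 300 + 1 = level + 1 - 299 from by ring]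
  split_ifs <;> first | rfl | omega

-- ===== VERDICT (by name: the statement is the Claim_ definition above) =====
theorem mr_to_points_spec : Claim_equal_mr_to_points := by
  intro level _ hpre
  unfold Spec_mr_to_points
  have hp : (1 : Int) ≤ level := hpre
  have hfuel : level - 1 < (level.toNat : Int) := by omega
  unfold mr_to_points
  rw [loopA_eq level.toNat 1 0 level hp hfuel, zero_add]
  have hn : (((level - 1).toNat : Int)) + 1 = level := by omega
  have hcum := cumB_eq (level - 1).toNat
  rw [hn] at hcum
  have halt : mr_to_points_alt level
      = ((if level ≤ 300 then incB (level + 1) else incB level), cumB level) := by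
    rw [← alt_snd, ← alt_fst]
  rw [halt, hcum, incB_eq level hp]
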